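-- pv_equiv track=rewrite | github.com/zaiyr-sh/yandex-algorithm-training | lectures/week_2/task_6.py | shortWords
-- ===== SOURCE A (Python) =====
-- def shortWords(words):
--     minLen = len(words[0])
--     for word in words:
--         if len(word) < minLen:
--             minLen = len(word)
--     ans = []
--     for word in words:
--         if len(word) == minLen:
--             ans.append(word)
--     return " ".join(ans)
-- ===== SOURCE B (Python) =====
-- def shortWords(words):
--     minLen = len(words[0])
--     ans = []
--     for word in words:
--         l = len(word)
--         if l < minLen:
--             minLen = l
--             ans = [word]
--         elif l == minLen:
--             ans.append(word)
--     return " ".join(ans)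
-- ===== Notes on version B (the rewrite author's own statement) =====
-- stated objective: alternative
-- what changed: Single pass that maintains the current minimum length and the answer list together (resetting the list when a strictly shorter word appears), instead of A's two separate passes (min-finding pass, then filter pass).
import Mathlib
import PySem

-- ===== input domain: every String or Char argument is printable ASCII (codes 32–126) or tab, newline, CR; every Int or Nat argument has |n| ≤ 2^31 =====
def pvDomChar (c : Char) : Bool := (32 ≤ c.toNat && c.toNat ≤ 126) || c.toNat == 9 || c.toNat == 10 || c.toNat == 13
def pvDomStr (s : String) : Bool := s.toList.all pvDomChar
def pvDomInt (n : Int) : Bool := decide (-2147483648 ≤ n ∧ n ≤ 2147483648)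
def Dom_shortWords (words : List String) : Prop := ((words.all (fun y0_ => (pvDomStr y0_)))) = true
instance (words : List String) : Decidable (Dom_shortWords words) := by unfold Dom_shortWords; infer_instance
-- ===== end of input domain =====

-- B replaces A's two passes (min pass, then filter pass) by one pass that keeps
-- the running minimum length and the answer list together; same result, same cost class.

-- ===== PORT A =====
-- A: first loop finds the minimal length, second loop collects words of that length.
def shortWords (words : List String) : String :=
  match words with
  | [] => ""   -- Python raises IndexError on words[0]; excluded by Pre_shortWords
  | w0 :: _ =>
    let minLen := words.foldl (fun m w => if PySem.Str.len w < m then PySem.Str.len w else m)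
      (PySem.Str.len w0)
    let ans := words.foldl (fun acc w => if PySem.Str.len w = minLen then acc ++ [w] else acc) []
    PySem.Str.join " " ans

-- ===== PORT B =====
-- B's single loop: shorter word resets the answer list, equal length appends.
def shortWordsLoop (m : Int) (ans : List String) : List String → Int × List String
  | [] => (m, ans)
  | w :: ws =>
    let l := PySem.Str.len w
    if l < m then shortWordsLoop l [w] ws
    else if l = m then shortWordsLoop m (ans ++ [w]) ws
    else shortWordsLoop m ans ws

def shortWords_alt (words : List String) : String :=
  match words with
  | [] => ""   -- Python raises IndexError on words[0]; excluded by Pre_shortWords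
  | w0 :: _ =>
    PySem.Str.join " " (shortWordsLoop (PySem.Str.len w0) [] words).2

-- ===== PRECONDITION & SPEC =====
-- Both Pythons raise IndexError on words[0] when the list is empty; nothing else raises.
def Pre_shortWords (words : List String) : Prop := words ≠ []
instance (words : List String) : Decidable (Pre_shortWords words) := by unfold Pre_shortWords; infer_instance
def pvWitness_shortWords : List String := (["ab", "c", "de"])

def Spec_shortWords (words : List String) (out : String) : Prop := out = shortWords_alt words
instance (words : List String) (out : String) : Decidable (Spec_shortWords words out) := by unfold Spec_shortWords; infer_instance

-- ===== CLAIM (what is proved, stated in full; the proofs are below) =====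
def Claim_equal_shortWords : Prop := ∀ (words : List String), Dom_shortWords words → Pre_shortWords words → Spec_shortWords words (shortWords words)

-- ===== LEMMAS AND PROOFS =====

-- minimum-so-far fold of A's first loop
def pvAmin (ws : List String) (m : Int) : Int :=
  ws.foldl (fun m w => if PySem.Str.len w < m then PySem.Str.len w else m) m

lemma pvAmin_le (ws : List String) (m : Int) : pvAmin ws m ≤ m := by
  induction ws generalizing m with
  | nil => simp [pvAmin]
  | cons w ws ih =>
    simp only [pvAmin, List.foldl_cons]
    split_ifs with h
    · exact le_trans (ih _) (le_of_lt h)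
    · exact ih m

lemma pvAmin_cons (w : String) (ws : List String) (m : Int) :
    pvAmin (w :: ws) m = pvAmin ws (if PySem.Str.len w < m then PySem.Str.len w else m) := rfl

lemma shortWordsLoop_eq (ws : List String) (m : Int) (ans : List String) :
    shortWordsLoop m ans ws =
      (pvAmin ws m,
       (if pvAmin ws m = m then ans else []) ++
         ws.filter (fun w => PySem.Str.len w = pvAmin ws m)) := by
  induction ws generalizing m ans with
  | nil => simp [shortWordsLoop, pvAmin]
  | cons w ws ih =>
    simp only [shortWordsLoop]
    rw [pvAmin_cons, List.filter_cons]
    by_cases h1 : PySem.Str.len w < m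
    · rw [if_pos h1, if_pos h1, ih]
      have hle := pvAmin_le ws (PySem.Str.len w)
      have hne : pvAmin ws (PySem.Str.len w) ≠ m := by omega
      rw [if_neg hne]
      by_cases hw : PySem.Str.len w = pvAmin ws (PySem.Str.len w)
      · rw [if_pos hw.symm, if_pos (decide_eq_true hw)]
        simp
      · rw [decide_eq_false hw, if_neg (fun hc => hw hc.symm),
          if_neg Bool.false_ne_true]
    · rw [if_neg h1, if_neg h1]
      by_cases h2 : PySem.Str.len w = m
      · rw [if_pos h2, ih]
        by_cases h3 : pvAmin ws m = m
        · rw [if_pos h3, if_pos h3, if_pos (decide_eq_true (h3.symm ▸ h2))]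
          simp
        · have hle := pvAmin_le ws m
          have hne : PySem.Str.len w ≠ pvAmin ws m := by omega
          rw [if_neg h3, if_neg h3, decide_eq_false hne, if_neg Bool.false_ne_true]
      · have hle := pvAmin_le ws m
        have hne : PySem.Str.len w ≠ pvAmin ws m := by omega
        rw [if_neg h2, ih, decide_eq_false hne, if_neg Bool.false_ne_true]

lemma shortWords_filter (words : List String) (minLen : Int) :
    words.foldl (fun acc w => if PySem.Str.len w = minLen then acc ++ [w] else acc) [] =
      words.filter (fun w => PySem.Str.len w = minLen) := by
  simpa using PySem.List.foldl_append_ite_eq_filter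
    (p := fun w => PySem.Str.len w = minLen) (l := words) (acc := [])

-- ===== VERDICT (by name: the statement is the Claim_ definition above) =====
theorem shortWords_spec : Claim_equal_shortWords := by
  intro words _ hpre
  unfold Spec_shortWords
  match words with
  | [] => exact absurd rfl hpre
  | w0 :: ws =>
    simp only [shortWords, shortWords_alt, shortWordsLoop]
    rw [if_neg (lt_irrefl _), if_pos trivial, shortWordsLoop_eq, shortWords_filter]
    have h0 : pvAmin (w0 :: ws) (PySem.Str.len w0) = pvAmin ws (PySem.Str.len w0) := by
      rw [pvAmin_cons, if_neg (lt_irrefl _)]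
    rw [show (w0 :: ws).foldl (fun m w => if PySem.Str.len w < m then PySem.Str.len w else m)
        (PySem.Str.len w0) = pvAmin (w0 :: ws) (PySem.Str.len w0) from rfl, h0,
      List.filter_cons]
    have hle := pvAmin_le ws (PySem.Str.len w0)
    by_cases hw : PySem.Str.len w0 = pvAmin ws (PySem.Str.len w0)
    · rw [if_pos (decide_eq_true hw), if_pos hw.symm]
      simp
    · rw [decide_eq_false hw, if_neg Bool.false_ne_true,
        if_neg (fun hc => hw hc.symm)]
      simp
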